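-- pv_equiv track=rewrite | github.com/JetBrains-Research/docs-fine-tuning | text_models/task_models/assignment_recommendation.py | numerate_labels
-- ===== SOURCE A (Python) =====
-- from typing import List, Union, Iterable, Dict, Optional
--
-- def numerate_labels(labels: List[str]) -> Dict[str, int]:
--     result = {}
--     i = 0
--     for label in labels:
--         if label not in result:
--             result[label] = i
--             i += 1
--     return result
-- ===== SOURCE B (Python) =====
-- def numerate_labels(labels):
--     first = {label: pos for pos, label in reversed(list(enumerate(labels)))}
--     uniq = sorted(first, key=first.get)
--     return dict(zip(uniq, range(len(uniq))))
-- ===== Notes on version B (the rewrite author's own statement) =====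
-- stated objective: alternative
-- what changed: Replaces A's single conditional pass with a membership test and manual counter by a sort-based pipeline: a reversed overwrite pass over enumerate(labels) records each label's first-occurrence position, the keys are sorted by that position, and indices are assigned by zipping with a range.
import Mathlib
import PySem

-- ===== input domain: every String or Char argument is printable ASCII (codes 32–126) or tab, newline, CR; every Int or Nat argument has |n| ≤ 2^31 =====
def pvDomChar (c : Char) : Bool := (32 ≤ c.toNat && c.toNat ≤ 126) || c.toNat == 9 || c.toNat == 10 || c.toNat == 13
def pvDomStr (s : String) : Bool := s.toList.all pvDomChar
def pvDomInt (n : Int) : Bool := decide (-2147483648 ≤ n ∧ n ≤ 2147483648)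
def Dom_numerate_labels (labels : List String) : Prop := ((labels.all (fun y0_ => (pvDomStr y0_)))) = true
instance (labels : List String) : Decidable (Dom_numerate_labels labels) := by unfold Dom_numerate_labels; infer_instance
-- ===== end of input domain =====

-- B replaces A's single conditional pass (membership test + manual counter) by a sort-based
-- pipeline: a reversed overwrite pass collects first-occurrence positions, the keys are
-- sorted by that position and zipped with a range (objective: alternative); return values
-- proved equal on all inputs.

-- ===== PORT A =====
-- result = {}; i = 0; for label in labels: if label not in result: result[label] = i; i += 1
def numerate_labels (labels : List String) : List (String × Int) :=
  (labels.foldl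
    (fun (st : PySem.Dict String Int × Int) label =>
      if st.1.contains label = false then (st.1.insert label st.2, st.2 + 1) else st)
    (PySem.Dict.empty, 0)).1.items

-- ===== PORT B =====
-- first = {label: pos for pos, label in reversed(list(enumerate(labels)))}: a dict
-- comprehension is a foldl of insert; reversed(list(enumerate(labels))) is
-- (enumerate labels).reverse. uniq = sorted(first, key=first.get): iterating the dict
-- yields first.keys; first.get never returns None on a key of first, so the port uses
-- (get? …).getD 0 — exact here; the key is injective on the keys, so the sort is
-- order-exact. dict(zip(uniq, range(len(uniq)))): uniq has no duplicates, so the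
-- dict's items are exactly the zipped pairs.
def numerate_labels_alt (labels : List String) : List (String × Int) :=
  let first := ((PySem.List.enumerate labels).reverse).foldl
      (fun (d : PySem.Dict String Int) p => d.insert p.2 p.1) PySem.Dict.empty
  let uniq := PySem.List.sorted first.keys (fun l => (first.get? l).getD 0)
  uniq.zip (PySem.List.pyRange 0 (uniq.length : Int) 1)

-- ===== PRECONDITION & SPEC =====
def Spec_numerate_labels (labels : List String) (out : List (String × Int)) : Prop := out = numerate_labels_alt labels
instance (labels : List String) (out : List (String × Int)) : Decidable (Spec_numerate_labels labels out) := by unfold Spec_numerate_labels; infer_instance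

-- ===== CLAIM (what is proved, stated in full; the proofs are below) =====
def Claim_equal_numerate_labels : Prop := ∀ (labels : List String), Dom_numerate_labels labels → Spec_numerate_labels labels (numerate_labels labels)

-- ===== LEMMAS AND PROOFS =====

-- A's loop state when the set of labels seen so far (in order) is s.
def pvState (s : List String) : PySem.Dict String Int × Int :=
  (PySem.Dict.mk ((PySem.List.enumerate s).map (fun p => (p.2, p.1))), (s.length : Int))

theorem pv_enumerate_append_singleton {α : Type} (xs : List α) (y : α) (start : Int) :
    PySem.List.enumerate (xs ++ [y]) start
      = PySem.List.enumerate xs start ++ [(start + xs.length, y)] := by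
  induction xs generalizing start with
  | nil => simp [PySem.List.enumerate]
  | cons x t ih =>
      simp only [List.cons_append, PySem.List.enumerate_cons, ih, List.length_cons]
      push_cast
      ring_nf

theorem pv_state_contains (s : List String) (l : String) :
    (pvState s).1.contains l = s.contains l := by
  have hk : (pvState s).1.keys = s := by
    simp only [pvState, PySem.Dict.keys, List.map_map]
    have h : ((fun x : String × Int => x.1) ∘ fun p : Int × String => (p.2, p.1))
        = (fun p : Int × String => p.2) := rfl
    rw [h, PySem.List.map_snd_enumerate]
  rw [PySem.Dict.contains_eq_decide_mem_keys, hk]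
  simp

-- Invariant of A's loop: after consuming 'labels' from state pvState s, the state is
-- pvState of the ordered union.
theorem pv_loop (labels : List String) : ∀ (s : List String),
    labels.foldl
      (fun (st : PySem.Dict String Int × Int) label =>
        if st.1.contains label = false then (st.1.insert label st.2, st.2 + 1) else st)
      (pvState s)
    = pvState (labels.foldl PySem.Set.add s) := by
  induction labels with
  | nil => intro s; rfl
  | cons l t ih =>
      intro s
      rw [List.foldl_cons, List.foldl_cons]
      by_cases h : s.contains l = true
      · have hm : l ∈ s := by simpa using h
        have ha : PySem.Set.add s l = s := by simp [PySem.Set.add, hm]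
        have hstep :
            (if (pvState s).1.contains l = false
              then ((pvState s).1.insert l (pvState s).2, (pvState s).2 + 1)
              else pvState s) = pvState s := by
          rw [pv_state_contains, h]; simp
        rw [hstep, ha]; exact ih s
      · have hc : s.contains l = false := by simpa using h
        have hm : l ∉ s := by simpa using hc
        have ha : PySem.Set.add s l = s ++ [l] := by simp [PySem.Set.add, hm]
        have hstep :
            (if (pvState s).1.contains l = false
              then ((pvState s).1.insert l (pvState s).2, (pvState s).2 + 1)
              else pvState s) = pvState (s ++ [l]) := by
          rw [pv_state_contains, hc, if_pos rfl]
          rw [Prod.ext_iff]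
          constructor
          · apply PySem.Dict.ext
            rw [PySem.Dict.items_insert_of_not_contains]
            · simp [pvState, pv_enumerate_append_singleton]
            · rw [pv_state_contains]; exact hc
          · simp [pvState]
        rw [hstep, ha]; exact ih (s ++ [l])

-- B's 'first' dict, as a function of the still-unconsumed suffix (enumerate starts at s).
def pvFirst (labels : List String) (s : Int) : PySem.Dict String Int :=
  ((PySem.List.enumerate labels s).reverse).foldl
    (fun (d : PySem.Dict String Int) p => d.insert p.2 p.1) PySem.Dict.empty

-- The reversed overwrite pass stores each label's FIRST-occurrence position.
theorem pv_first_get? (labels : List String) : ∀ (s : Int) (lbl : String),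
    (pvFirst labels s).get? lbl
      = (PySem.List.index? labels lbl).map (fun k => s + (k : Int)) := by
  induction labels with
  | nil => intro s lbl; simp [pvFirst, PySem.List.enumerate, PySem.List.index?_eq_idxOf?]
  | cons x t ih =>
      intro s lbl
      have hstep : pvFirst (x :: t) s = (pvFirst t (s + 1)).insert x s := by
        simp [pvFirst, PySem.List.enumerate_cons, List.foldl_append]
      rw [hstep]
      by_cases hx : lbl = x
      · subst hx
        rw [PySem.Dict.get?_insert_self, PySem.List.index?_cons_self]
        simp
      · rw [PySem.Dict.get?_insert_of_ne _ _ hx,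
            PySem.List.index?_cons_of_ne t (fun h => hx h.symm), ih (s + 1) lbl]
        cases PySem.List.index? t lbl with
        | none => simp
        | some k => simp; push_cast; ring

-- The ordered distinct labels are pairwise strictly increasing in first-occurrence index,
-- so B's sort arranges 'first's keys exactly into first-occurrence order.
theorem pv_ofList_pairwise (labels : List String) :
    (PySem.Set.ofList labels).Pairwise
      (fun a b => (PySem.List.index? labels a).getD 0 < (PySem.List.index? labels b).getD 0) := by
  induction labels with
  | nil => simp [PySem.Set.ofList]
  | cons x t ih =>
      rw [PySem.Set.ofList_cons]
      have hsub : ((PySem.Set.ofList t).discard x).Sublist (PySem.Set.ofList t) := by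
        simp [PySem.Set.discard]
      constructor
      · intro b hb
        rcases (PySem.Set.mem_discard _ _ _).1 hb with ⟨hbt, hbx⟩
        have hbmem : b ∈ t := by simpa [PySem.Set.mem_ofList] using hbt
        rw [PySem.List.index?_cons_self]
        rw [PySem.List.index?_cons_of_ne t (fun h => hbx h.symm)]
        rcases Option.isSome_iff_exists.1 ((PySem.List.index?_isSome_iff t b).2 hbmem) with ⟨k, hk⟩
        rw [PySem.List.index?_eq_idxOf?] at hk
        simp [hk]
      · have hpair := ih.sublist hsub
        refine hpair.imp_of_mem ?_
        intro a b ha hb hab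
        have hax : a ≠ x := ((PySem.Set.mem_discard _ _ _).1 ha).2
        have hbx : b ≠ x := ((PySem.Set.mem_discard _ _ _).1 hb).2
        have hat : a ∈ t := by
          simpa [PySem.Set.mem_ofList] using ((PySem.Set.mem_discard _ _ _).1 ha).1
        have hbt : b ∈ t := by
          simpa [PySem.Set.mem_ofList] using ((PySem.Set.mem_discard _ _ _).1 hb).1
        rw [PySem.List.index?_cons_of_ne t (fun h => hax h.symm),
            PySem.List.index?_cons_of_ne t (fun h => hbx h.symm)]
        rcases Option.isSome_iff_exists.1 ((PySem.List.index?_isSome_iff t a).2 hat) with ⟨ka, hka⟩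
        rcases Option.isSome_iff_exists.1 ((PySem.List.index?_isSome_iff t b).2 hbt) with ⟨kb, hkb⟩
        rw [hka, hkb] at hab ⊢
        simpa using hab

-- zip with range(len) is enumerate with the pair swapped.
theorem pv_zip_range {α : Type} (xs : List α) : ∀ (a : Int),
    xs.zip (PySem.List.pyRange a (a + xs.length) 1)
      = (PySem.List.enumerate xs a).map (fun p => (p.2, p.1)) := by
  induction xs with
  | nil => intro a; simp [PySem.List.enumerate]
  | cons x t ih =>
      intro a
      have hcons : PySem.List.pyRange a (a + (x :: t).length) 1
          = a :: PySem.List.pyRange (a + 1) (a + (x :: t).length) 1 :=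
        PySem.List.pyRange_one_cons (by simp)
      have hlen : (a : Int) + ((x :: t).length : Int) = (a + 1) + (t.length : Int) := by
        push_cast [List.length_cons]; ring
      rw [hcons, hlen, PySem.List.enumerate_cons]
      simp only [List.zip_cons_cons, List.map_cons, ih (a + 1)]

-- B's sort puts 'first's keys into first-occurrence order, i.e. A's dedup order.
theorem pv_sorted_keys (labels : List String) :
    PySem.List.sorted (pvFirst labels 0).keys
      (fun l => ((pvFirst labels 0).get? l).getD 0) = PySem.Set.ofList labels := by
  have hkeys : (pvFirst labels 0).keys = PySem.Set.ofList labels.reverse := by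
    have h := PySem.Dict.keys_foldl_insert_key (ν := Int)
      ((PySem.List.enumerate labels).reverse) (fun p => p.2) (fun _ p => p.1)
      PySem.Dict.empty
    have hmap : ((PySem.List.enumerate labels).reverse).map (fun p : Int × String => p.2)
        = labels.reverse := by
      rw [List.map_reverse, PySem.List.map_snd_enumerate]
    rw [hmap] at h
    exact h.trans (PySem.Set.ofList_eq_foldl labels.reverse).symm
  have hperm : (PySem.Set.ofList labels).Perm (pvFirst labels 0).keys := by
    rw [hkeys]
    refine (List.perm_ext_iff_of_nodup (PySem.Set.nodup_ofList _)
      (PySem.Set.nodup_ofList _)).2 ?_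
    intro a; simp [PySem.Set.mem_ofList]
  refine PySem.List.sorted_eq_of_perm_of_pairwise_lt _ _ _ hperm ?_
  refine (pv_ofList_pairwise labels).imp_of_mem ?_
  intro a b ha hb hab
  have hal : a ∈ labels := (PySem.Set.mem_ofList _ _).1 ha
  have hbl : b ∈ labels := (PySem.Set.mem_ofList _ _).1 hb
  rcases Option.isSome_iff_exists.1 ((PySem.List.index?_isSome_iff labels a).2 hal) with ⟨ka, hka⟩
  rcases Option.isSome_iff_exists.1 ((PySem.List.index?_isSome_iff labels b).2 hbl) with ⟨kb, hkb⟩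
  rw [pv_first_get?, pv_first_get?, hka, hkb]
  rw [hka, hkb] at hab
  simp at hab ⊢
  exact_mod_cast hab

-- ===== VERDICT (by name: the statement is the Claim_ definition above) =====
theorem numerate_labels_spec : Claim_equal_numerate_labels := by
  intro labels _
  show numerate_labels labels = numerate_labels_alt labels
  have h0 : (PySem.Dict.empty (κ := String) (ν := Int), (0 : Int)) = pvState [] := rfl
  have hofl : labels.foldl PySem.Set.add [] = PySem.Set.ofList labels :=
    (PySem.Set.ofList_eq_foldl labels).symm
  rw [numerate_labels, h0, pv_loop, hofl, numerate_labels_alt]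
  show _ = (PySem.List.sorted (pvFirst labels 0).keys
      (fun l => ((pvFirst labels 0).get? l).getD 0)).zip
      (PySem.List.pyRange 0
        (((PySem.List.sorted (pvFirst labels 0).keys
          (fun l => ((pvFirst labels 0).get? l).getD 0)).length : Int)) 1)
  rw [pv_sorted_keys labels]
  rw [show ((PySem.Set.ofList labels).length : Int)
      = 0 + ((PySem.Set.ofList labels).length : Int) by ring]
  rw [pv_zip_range (PySem.Set.ofList labels) 0]
  rfl
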